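-- pv_equiv track=rewrite | github.com/gtrivedi88/content-editorial-assistant | validation/config/linguistic_anchors_config.py | _find_word_index
-- ===== SOURCE A (Python) =====
-- def _find_word_index(text: str, char_position: int) -> int:
--     """
--     Find the word index for a character position.
--
--     Args:
--         text: Full text
--         char_position: Character position
--
--     Returns:
--         Word index, or -1 if not found
--     """
--     words = text.split()
--     current_position = 0
--
--     for i, word in enumerate(words):
--         word_start = current_position
--         word_end = current_position + len(word)
--
--         if word_start <= char_position <= word_end:
--             return i
--
--         current_position = word_end + 1  # +1 for space
--
--     return -1
-- ===== SOURCE B (Python) =====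
-- def _find_word_index(text: str, char_position: int) -> int:
--     """Table-based re-implementation: build the start-offset table for all
--     words in one pass, then locate the candidate word by counting starts
--     <= char_position and verify the inclusive end bound."""
--     words = text.split()
--     starts = []
--     pos = 0
--     for w in words:
--         starts.append(pos)
--         pos += len(w) + 1
--     k = sum(1 for s in starts if s <= char_position)
--     if k == 0:
--         return -1
--     j = k - 1
--     if char_position <= starts[j] + len(words[j]):
--         return j
--     return -1
-- ===== Notes on version B (the rewrite author's own statement) =====
-- stated objective: alternative
-- what changed: Replaced A's single early-return scan-and-compare loop by a two-phase table approach: one pass builds the word start-offset table, then the candidate word is located by counting starts <= char_position and verified against its inclusive end.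
import Mathlib
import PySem

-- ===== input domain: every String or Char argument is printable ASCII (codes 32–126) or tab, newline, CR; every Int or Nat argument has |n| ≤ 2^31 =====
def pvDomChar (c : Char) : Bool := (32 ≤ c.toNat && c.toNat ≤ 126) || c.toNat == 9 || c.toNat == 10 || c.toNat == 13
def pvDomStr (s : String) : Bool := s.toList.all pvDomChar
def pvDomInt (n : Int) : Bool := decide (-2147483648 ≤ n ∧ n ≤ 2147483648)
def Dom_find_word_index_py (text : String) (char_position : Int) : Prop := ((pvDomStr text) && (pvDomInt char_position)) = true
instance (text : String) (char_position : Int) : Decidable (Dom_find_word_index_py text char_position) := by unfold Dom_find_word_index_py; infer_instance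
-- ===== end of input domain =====

-- B replaces A's early-return scan by a start-offset table built in one pass plus a count-based lookup; objective: alternative structure, same cost.

-- ===== PORT A =====
-- the for-loop of A: carries the enumerate index i and current_position
def fwiGoA (char_position : Int) : List String → Int → Int → Int
  | [], _, _ => -1
  | w :: ws, i, cur =>
    if cur ≤ char_position ∧ char_position ≤ cur + PySem.Str.len w then i
    else fwiGoA char_position ws (i + 1) (cur + PySem.Str.len w + 1)

def find_word_index_py (text : String) (char_position : Int) : Int :=
  fwiGoA char_position (PySem.Str.split₀ text) 0 0

-- ===== PORT B =====
-- one pass building the starts table (Source B's first loop)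
def fwiStarts : List String → Int → List Int
  | [], _ => []
  | w :: ws, pos => pos :: fwiStarts ws (pos + PySem.Str.len w + 1)

def find_word_index_py_alt (text : String) (char_position : Int) : Int :=
  let words := PySem.Str.split₀ text
  let starts := fwiStarts words 0
  let k := starts.countP (fun s => decide (s ≤ char_position))
  if k = 0 then -1
  else
    match words[k-1]?, starts[k-1]? with
    | some w, some s => if char_position ≤ s + PySem.Str.len w then ((k - 1 : Nat) : Int) else -1
    | _, _ => -1

-- ===== PRECONDITION & SPEC =====
def Spec_find_word_index_py (text : String) (char_position : Int) (out : Int) : Prop := out = find_word_index_py_alt text char_position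
instance (text : String) (char_position : Int) (out : Int) : Decidable (Spec_find_word_index_py text char_position out) := by unfold Spec_find_word_index_py; infer_instance

-- ===== CLAIM (what is proved, stated in full; the proofs are below) =====
def Claim_equal_find_word_index_py : Prop := ∀ (text : String) (char_position : Int), Dom_find_word_index_py text char_position → Spec_find_word_index_py text char_position (find_word_index_py text char_position)

-- ===== LEMMAS AND PROOFS =====

-- every start in the table is ≥ the initial offset
lemma fwiStarts_lb : ∀ (ws : List String) (cur x : Int), x ∈ fwiStarts ws cur → cur ≤ x := by
  intro ws
  induction ws with
  | nil => intro cur x h; simp [fwiStarts] at h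
  | cons w ws ih =>
    intro cur x h
    simp only [fwiStarts, List.mem_cons] at h
    rcases h with rfl | h
    · exact le_refl _
    · have := ih _ _ h
      have hl : (0 : Int) ≤ PySem.Str.len w := by simp only [PySem.Str.len_eq]; exact Int.natCast_nonneg _
      omega

-- a table built left of char_position contributes no counts
lemma fwiStarts_count_zero (p : Int) (ws : List String) (cur : Int) (h : p < cur) :
    (fwiStarts ws cur).countP (fun s => decide (s ≤ p)) = 0 := by
  rw [List.countP_eq_zero]
  intro x hx
  have := fwiStarts_lb ws cur x hx
  simp only [decide_eq_true_eq]
  omega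

-- if char_position is left of cur, A's scan never fires
lemma fwiGoA_neg (p : Int) : ∀ ws (i cur : Int), p < cur → fwiGoA p ws i cur = -1 := by
  intro ws
  induction ws with
  | nil => intro i cur _; simp [fwiGoA]
  | cons w ws ih =>
    intro i cur h
    have hl : (0 : Int) ≤ PySem.Str.len w := by simp only [PySem.Str.len_eq]; exact Int.natCast_nonneg _
    simp only [fwiGoA]
    rw [if_neg (by omega)]
    exact ih _ _ (by omega)

-- the lookup phase of B, with generic table and index base
def fwiLookup (p : Int) (ws : List String) (starts : List Int) (i : Int) : Int :=
  let k := starts.countP (fun s => decide (s ≤ p))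
  if k = 0 then -1
  else match ws[k-1]?, starts[k-1]? with
    | some w, some s => if p ≤ s + PySem.Str.len w then i + ((k - 1 : Nat) : Int) else -1
    | _, _ => -1

-- main invariant: A's scan from (i, cur) equals B's lookup on the table built from cur, with index base i
lemma fwi_main (p : Int) : ∀ (ws : List String) (i cur : Int),
    fwiGoA p ws i cur = fwiLookup p ws (fwiStarts ws cur) i := by
  intro ws
  induction ws with
  | nil => intro i cur; simp [fwiGoA, fwiStarts, fwiLookup]
  | cons w ws ih =>
    intro i cur
    have hL : (0 : Int) ≤ PySem.Str.len w := by
      simp only [PySem.Str.len_eq]; exact Int.natCast_nonneg _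
    set L := PySem.Str.len w with hLdef
    set tail := fwiStarts ws (cur + L + 1) with htail
    set k' := tail.countP (fun s => decide (s ≤ p)) with hk'
    have hstarts : fwiStarts (w :: ws) cur = cur :: tail := rfl
    have hLn : L = (w.length : Int) := by rw [hLdef, PySem.Str.len_eq]; simp
    by_cases hc : cur ≤ p
    · have hcount : (cur :: tail).countP (fun s => decide (s ≤ p)) = k' + 1 := by
        simp [hc, hk']
      by_cases h2 : p ≤ cur + L
      · have hk0 : k' = 0 := by
          rw [hk', htail]; exact fwiStarts_count_zero p ws (cur + L + 1) (by omega)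
        rw [show fwiGoA p (w :: ws) i cur = i from by
              simp only [fwiGoA]; rw [if_pos ⟨hc, h2⟩]]
        rw [hstarts]
        simp only [fwiLookup, hcount, hk0]
        simp
        intro h3
        omega
      · have hA : fwiGoA p (w :: ws) i cur = fwiGoA p ws (i + 1) (cur + L + 1) := by
          simp only [fwiGoA]; rw [if_neg (by omega)]
        rw [hA, ih (i + 1) (cur + L + 1), ← htail]
        rcases Nat.eq_zero_or_pos k' with hk0 | hkpos
        · rw [show fwiLookup p ws tail (i + 1) = -1 from by
                simp [fwiLookup, ← hk', hk0]]
          rw [hstarts]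
          simp only [fwiLookup, hcount, hk0]
          simp
          intro h3
          omega
        · obtain ⟨k'', hkk⟩ : ∃ k'', k' = k'' + 1 := ⟨k' - 1, by omega⟩
          simp only [fwiLookup, hstarts, hcount, ← hk', hkk]
          simp only [Nat.add_sub_cancel, List.getElem?_cons_succ, Nat.succ_ne_zero,
            if_false, List.getElem?_cons_succ]
          rcases hws : ws[k'']? with _ | w2 <;> rcases hts : tail[k'']? with _ | s2 <;>
            simp only []
          split_ifs with h3
          · push_cast; ring
          · rfl
    · have hk0 : k' = 0 := by
        rw [hk', htail]; exact fwiStarts_count_zero p ws (cur + L + 1) (by omega)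
      have hcount : (cur :: tail).countP (fun s => decide (s ≤ p)) = 0 := by
        rw [List.countP_cons, ← hk', hk0]
        simp [hc]
      have hA : fwiGoA p (w :: ws) i cur = -1 := by
        simp only [fwiGoA]
        rw [if_neg (by omega)]
        exact fwiGoA_neg p ws (i + 1) (cur + L + 1) (by omega)
      rw [hA, hstarts]
      simp [fwiLookup, hcount]

-- ===== VERDICT (by name: the statement is the Claim_ definition above) =====
theorem find_word_index_py_spec : Claim_equal_find_word_index_py := by
  intro text p _
  unfold Spec_find_word_index_py find_word_index_py find_word_index_py_alt
  rw [fwi_main p (PySem.Str.split₀ text) 0 0]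
  simp only [fwiLookup, zero_add]
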